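-- pv_equiv track=rewrite | github.com/thiagoleite92/python-exercises | bloco32/exercise4.py | biggerName
-- ===== SOURCE A (Python) =====
-- def biggerName(nomes):
-- 	greaterName = []
--
-- 	nameLength = 0
--
-- 	for name in nomes:
-- 		if len(name) >= nameLength:
-- 				nameLength = len(name)
-- 				greaterName.append(name)
--
-- 	return greaterName
-- ===== SOURCE B (Python) =====
-- def biggerName(nomes):
--     # Pass 1: pref[i] = max length among nomes[:i] (0 for i == 0).
--     pref = []
--     m = 0
--     for n in nomes:
--         pref.append(m)
--         m = max(m, len(n))
--     # Pass 2: keep names at least as long as every strictly earlier name.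
--     return [n for n, p in zip(nomes, pref) if len(n) >= p]
-- ===== Notes on version B (the rewrite author's own statement) =====
-- stated objective: alternative
-- what changed: Replaces the single-pass running-max-with-append loop by two passes: precompute the exclusive prefix-maximum table of lengths, then select by comparing each name's length against it in a zip/filter comprehension.
import Mathlib
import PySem

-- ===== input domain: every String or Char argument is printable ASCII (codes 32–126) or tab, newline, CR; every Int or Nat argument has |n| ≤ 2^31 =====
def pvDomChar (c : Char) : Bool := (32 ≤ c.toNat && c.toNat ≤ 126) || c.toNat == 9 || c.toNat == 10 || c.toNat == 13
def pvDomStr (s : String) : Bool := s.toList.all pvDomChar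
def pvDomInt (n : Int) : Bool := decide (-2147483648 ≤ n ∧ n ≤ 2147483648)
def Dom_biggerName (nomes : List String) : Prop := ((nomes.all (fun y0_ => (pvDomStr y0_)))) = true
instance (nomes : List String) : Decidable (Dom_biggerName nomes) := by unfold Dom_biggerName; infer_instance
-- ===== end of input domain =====

-- B replaces A's single running-max append loop by two passes (exclusive prefix-max table, then a zip/filter selection); objective: alternative decomposition, same cost.


-- ===== PORT A =====
-- for name in nomes: if len(name) >= nameLength: update nameLength, append name
def biggerName (nomes : List String) : List String :=
  (nomes.foldl
    (fun (s : List String × Int) name =>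
      if PySem.Str.len name ≥ s.2 then (s.1 ++ [name], PySem.Str.len name) else s)
    ([], 0)).1

-- ===== PORT B =====
-- pass 1: exclusive prefix maxima of lengths; pass 2: zip/filter selection
def biggerName_alt (nomes : List String) : List String :=
  let pref := (nomes.foldl
    (fun (s : List Int × Int) n => (s.1 ++ [s.2], max s.2 (PySem.Str.len n)))
    ([], 0)).1
  ((nomes.zip pref).filter (fun p => decide (PySem.Str.len p.1 ≥ p.2))).map Prod.fst

-- ===== PRECONDITION & SPEC =====
def Spec_biggerName (nomes : List String) (out : List String) : Prop := out = biggerName_alt nomes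
instance (nomes : List String) (out : List String) : Decidable (Spec_biggerName nomes out) := by unfold Spec_biggerName; infer_instance

-- ===== CLAIM (what is proved, stated in full; the proofs are below) =====
def Claim_equal_biggerName : Prop := ∀ (nomes : List String), Dom_biggerName nomes → Spec_biggerName nomes (biggerName nomes)

-- ===== LEMMAS AND PROOFS =====

-- common specification: names whose length reaches the running max m of earlier names
def pvSel (nomes : List String) (m : Int) : List String :=
  match nomes with
  | [] => []
  | n :: r => (if PySem.Str.len n ≥ m then [n] else []) ++ pvSel r (max m (PySem.Str.len n))

-- exclusive prefix maxima starting from m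
def pvPrefs (nomes : List String) (m : Int) : List Int :=
  match nomes with
  | [] => []
  | n :: r => m :: pvPrefs r (max m (PySem.Str.len n))

theorem pvFoldA_eq (nomes : List String) (acc : List String) (m : Int) :
    (nomes.foldl
      (fun (s : List String × Int) name =>
        if PySem.Str.len name ≥ s.2 then (s.1 ++ [name], PySem.Str.len name) else s)
      (acc, m)).1 = acc ++ pvSel nomes m := by
  induction nomes generalizing acc m with
  | nil => simp [pvSel]
  | cons n r ih =>
    rw [List.foldl_cons]
    by_cases h : PySem.Str.len n ≥ m
    · rw [if_pos h]
      simp only [pvSel]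
      rw [max_eq_right h, if_pos h, ih, List.append_assoc, List.singleton_append]
    · rw [if_neg h]
      simp only [pvSel]
      rw [max_eq_left (by omega), if_neg h, List.nil_append, ih]

theorem pvFoldPref_eq (nomes : List String) (acc : List Int) (m : Int) :
    (nomes.foldl
      (fun (s : List Int × Int) n => (s.1 ++ [s.2], max s.2 (PySem.Str.len n)))
      (acc, m)).1 = acc ++ pvPrefs nomes m := by
  induction nomes generalizing acc m with
  | nil => simp [pvPrefs]
  | cons n r ih =>
    rw [List.foldl_cons]
    simp only [pvPrefs]
    rw [ih, List.append_assoc, List.singleton_append]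

theorem pvZip_sel (nomes : List String) (m : Int) :
    ((nomes.zip (pvPrefs nomes m)).filter (fun p => decide (PySem.Str.len p.1 ≥ p.2))).map
      Prod.fst = pvSel nomes m := by
  induction nomes generalizing m with
  | nil => simp [pvPrefs, pvSel]
  | cons n r ih =>
    simp only [pvPrefs, pvSel, List.zip_cons_cons, List.filter_cons]
    by_cases h : PySem.Str.len n ≥ m
    · rw [if_pos (decide_eq_true h), if_pos h, List.map_cons, ih, List.singleton_append]
    · rw [decide_eq_false h, if_neg Bool.false_ne_true, if_neg h, List.nil_append, ih]

-- ===== VERDICT (by name: the statement is the Claim_ definition above) =====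
theorem biggerName_spec : Claim_equal_biggerName := by
  intro nomes _
  show biggerName nomes = biggerName_alt nomes
  simp only [biggerName, biggerName_alt]
  rw [pvFoldA_eq, pvFoldPref_eq, List.nil_append, List.nil_append, pvZip_sel]
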